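-- pv_equiv track=rewrite | github.com/UTurtle/ladlm | function_based_noise_generator.py | distribute_files_across_levels
-- ===== SOURCE A (Python) =====
-- def distribute_files_across_levels(total_files, max_level):
--     files_per_level = total_files // max_level
--     remaining_files = total_files % max_level
--     level_counts = {level: files_per_level for level in range(1, max_level + 1)}
--     for level in range(1, max_level + 1):
--         if remaining_files > 0:
--             level_counts[level] += 1
--             remaining_files -= 1
--         else:
--             break
--     return level_counts
-- ===== SOURCE B (Python) =====
-- def distribute_files_across_levels(total_files, max_level):
--     # Greedy fair split: each level takes the ceiling of (files still left / levels still left).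
--     level_counts = {}
--     remaining = total_files
--     for level in range(1, max_level + 1):
--         share = -(-remaining // (max_level - level + 1))
--         level_counts[level] = share
--         remaining -= share
--     return level_counts
-- ===== Notes on version B (the rewrite author's own statement) =====
-- stated objective: alternative
-- what changed: Replaces A's precomputed quotient/remainder with a build-then-increment loop by a recursive greedy fair split in which each level takes the ceiling of remaining_files/levels_left, no quotient or remainder table ever built.
import Mathlib
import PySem

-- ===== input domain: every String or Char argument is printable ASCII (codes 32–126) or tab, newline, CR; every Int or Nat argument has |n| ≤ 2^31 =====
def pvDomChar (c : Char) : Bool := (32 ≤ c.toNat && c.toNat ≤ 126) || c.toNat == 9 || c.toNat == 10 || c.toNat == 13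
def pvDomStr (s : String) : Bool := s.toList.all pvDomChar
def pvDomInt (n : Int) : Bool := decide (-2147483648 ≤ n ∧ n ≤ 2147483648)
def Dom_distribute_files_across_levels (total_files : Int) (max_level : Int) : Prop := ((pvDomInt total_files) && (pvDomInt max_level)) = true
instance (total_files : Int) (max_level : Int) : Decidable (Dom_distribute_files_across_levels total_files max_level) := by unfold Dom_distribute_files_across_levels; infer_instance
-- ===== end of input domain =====

-- B replaces A's quotient/remainder build-then-increment passes by a recursive greedy split
-- (each level takes ceil(remaining/levels_left)); same cost, a different decomposition.


-- ===== PORT A =====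
-- the 'for level in …: if remaining_files > 0: level_counts[level] += 1; remaining_files -= 1 else: break' loop
def dflLoop (d : PySem.Dict Int Int) (rem : Int) : List Int → PySem.Dict Int Int
  | [] => d
  | l :: ls => if rem > 0 then dflLoop (d.modify l 0 (· + 1)) (rem - 1) ls else d

def distribute_files_across_levels (total_files : Int) (max_level : Int) : List (Int × Int) :=
  let files_per_level := PySem.Int.floordiv total_files max_level
  let remaining_files := PySem.Int.mod total_files max_level
  let lvls := PySem.List.pyRange 1 (max_level + 1) 1
  let level_counts := lvls.foldl (fun d l => d.insert l files_per_level) PySem.Dict.empty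
  (dflLoop level_counts remaining_files lvls).items

-- ===== PORT B =====
-- Source B's loop: state (level_counts, remaining); each level takes ceil(remaining / levels_left)
def distribute_files_across_levels_alt (total_files : Int) (max_level : Int) : List (Int × Int) :=
  ((PySem.List.pyRange 1 (max_level + 1) 1).foldl
    (fun s level =>
      let share := -(PySem.Int.floordiv (-s.2) (max_level - level + 1))
      (s.1.insert level share, s.2 - share))
    ((PySem.Dict.empty : PySem.Dict Int Int), total_files)).1.items

-- ===== PRECONDITION & SPEC =====
-- Pre_ excludes exactly max_level = 0, where Python A raises ZeroDivisionError
def Pre_distribute_files_across_levels (total_files : Int) (max_level : Int) : Prop := max_level ≠ 0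
instance (total_files : Int) (max_level : Int) : Decidable (Pre_distribute_files_across_levels total_files max_level) := by unfold Pre_distribute_files_across_levels; infer_instance
def pvWitness_distribute_files_across_levels : Int × Int := (7, 3)

def Spec_distribute_files_across_levels (total_files : Int) (max_level : Int) (out : List (Int × Int)) : Prop := out = distribute_files_across_levels_alt total_files max_level
instance (total_files : Int) (max_level : Int) (out : List (Int × Int)) : Decidable (Spec_distribute_files_across_levels total_files max_level out) := by unfold Spec_distribute_files_across_levels; infer_instance

-- ===== CLAIM (what is proved, stated in full; the proofs are below) =====
def Claim_equal_distribute_files_across_levels : Prop := ∀ (total_files : Int) (max_level : Int), Dom_distribute_files_across_levels total_files max_level → Pre_distribute_files_across_levels total_files max_level → Spec_distribute_files_across_levels total_files max_level (distribute_files_across_levels total_files max_level)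

-- ===== LEMMAS AND PROOFS =====

lemma dflLoop_zero (d : PySem.Dict Int Int) (L : List Int) : dflLoop d 0 L = d := by
  cases L <;> simp [dflLoop]

lemma mk_get_mid (P rest : List (Int × Int)) (a v : Int)
    (hP : ∀ p ∈ P, p.1 ≠ a) :
    (PySem.Dict.mk (P ++ (a, v) :: rest)).get? a = some v := by
  induction P with
  | nil => simp [PySem.Dict.get?_mk_cons]
  | cons p ps ih =>
      obtain ⟨k, w⟩ := p
      have hk : k ≠ a := hP (k, w) (by simp)
      simp only [List.cons_append, PySem.Dict.get?_mk_cons]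
      rw [if_neg (by simpa using hk)]
      exact ih (fun q hq => hP q (by simp [hq]))

lemma mk_modify_mid (P rest : List (Int × Int)) (a v : Int)
    (hP : ∀ p ∈ P, p.1 ≠ a) (hrest : ∀ p ∈ rest, p.1 ≠ a) :
    (PySem.Dict.mk (P ++ (a, v) :: rest)).modify a 0 (· + 1)
      = PySem.Dict.mk (P ++ (a, v + 1) :: rest) := by
  have hget := mk_get_mid P rest a v hP
  have hcont : (PySem.Dict.mk (P ++ (a, v) :: rest)).contains a = true := by
    simp [PySem.Dict.contains_mk, List.any_append]
  simp only [PySem.Dict.modify, PySem.Dict.getD, hget, Option.getD_some]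
  apply PySem.Dict.ext
  rw [PySem.Dict.items_insert_of_contains _ _ hcont]
  show List.map _ (P ++ (a, v) :: rest) = _
  rw [List.map_append, List.map_cons]
  congr 1
  · refine (List.map_congr_left fun p hp => ?_).trans (List.map_id P)
    rw [if_neg (by simpa using hP p hp)]; rfl
  · rw [if_pos (by simp)]
    congr 1
    refine (List.map_congr_left fun p hp => ?_).trans (List.map_id rest)
    rw [if_neg (by simpa using hrest p hp)]; rfl

-- A's loop over the range [a, a+n), started on P ++ [(l, fpl) | l ∈ range], increments
-- exactly the pairs whose key is below a + rem.
lemma dflLoop_range (fpl : Int) : ∀ (n : Nat) (a rem : Int) (P : List (Int × Int)),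
    0 ≤ rem → (∀ p ∈ P, p.1 < a) →
    dflLoop (PySem.Dict.mk (P ++ (PySem.List.pyRange a (a + n) 1).map (fun l => (l, fpl)))) rem
        (PySem.List.pyRange a (a + n) 1)
      = PySem.Dict.mk (P ++ (PySem.List.pyRange a (a + n) 1).map
          (fun l => (l, fpl + if l < a + rem then 1 else 0))) := by
  intro n
  induction n with
  | zero =>
      intro a rem P hrem hP
      simp [dflLoop]
  | succ n ih =>
      intro a rem P hrem hP
      rcases eq_or_lt_of_le hrem with h0 | hpos
      · subst h0
        rw [dflLoop_zero]
        congr 1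
        congr 1
        refine List.map_congr_left fun l hl => ?_
        have := (PySem.List.mem_pyRange_one.mp hl).1
        rw [if_neg (by omega)]
        simp
      · have hab : a < a + ((n + 1 : Nat) : Int) := by push_cast; omega
        rw [PySem.List.pyRange_one_cons hab]
        simp only [List.map_cons]
        simp only [dflLoop, if_pos hpos]
        rw [mk_modify_mid P _ a fpl (fun p hp => by exact ne_of_lt (hP p hp))
              (fun p hp => by
                simp only [List.mem_map] at hp
                obtain ⟨l, hl, rfl⟩ := hp
                have := (PySem.List.mem_pyRange_one.mp hl).1
                simp; omega)]
        have hshift : a + ((n + 1 : Nat) : Int) = (a + 1) + (n : Nat) := by push_cast; ring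
        rw [hshift]
        have hassoc : P ++ (a, fpl + 1) :: (PySem.List.pyRange (a+1) ((a+1) + (n:Nat)) 1).map (fun l => (l, fpl))
            = (P ++ [(a, fpl + 1)]) ++ (PySem.List.pyRange (a+1) ((a+1) + (n:Nat)) 1).map (fun l => (l, fpl)) := by
          simp
        rw [hassoc]
        rw [ih (a + 1) (rem - 1) (P ++ [(a, fpl + 1)]) (by omega)
              (fun p hp => by
                rcases List.mem_append.mp hp with h | h
                · exact lt_trans (hP p h) (by omega)
                · simp at h; subst h; simp)]
        congr 1
        rw [List.append_assoc]
        congr 1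
        rw [if_pos (by omega)]
        simp only [List.singleton_append]
        congr 1
        refine List.map_congr_left fun l hl => ?_
        have hcond : (a + 1) + (rem - 1) = a + rem := by ring
        rw [hcond]

-- A equals the closed-form assignment on positive max_level
lemma A_closed (total_files max_level : Int) (hpos : 0 < max_level) :
    distribute_files_across_levels total_files max_level
      = (PySem.List.pyRange 1 (max_level + 1) 1).map
          (fun l => (l, PySem.Int.floordiv total_files max_level
            + if l ≤ PySem.Int.mod total_files max_level then 1 else 0)) := by
  unfold distribute_files_across_levels
  dsimp only
  have hrem : 0 ≤ PySem.Int.mod total_files max_level := by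
    rw [PySem.Int.mod_eq_emod_of_pos hpos]
    exact Int.emod_nonneg _ (by omega)
  set fpl := PySem.Int.floordiv total_files max_level with hfpl
  set rem := PySem.Int.mod total_files max_level with hremdef
  have hinit : (PySem.List.pyRange 1 (max_level + 1) 1).foldl
        (fun d l => d.insert l fpl) PySem.Dict.empty
      = PySem.Dict.mk ([] ++ (PySem.List.pyRange 1 (max_level + 1) 1).map (fun l => (l, fpl))) := by
    apply PySem.Dict.ext
    rw [show (fun (d : PySem.Dict Int Int) (l : Int) => d.insert l fpl)
          = (fun d a => d.insert (id a) ((fun _ => fpl) a)) from rfl]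
    rw [PySem.Dict.items_foldl_insert_fresh (PySem.List.pyRange 1 (max_level + 1) 1)
          id (fun _ => fpl) PySem.Dict.empty
          (fun a _ => PySem.Dict.contains_empty _)
          (by simpa using PySem.List.nodup_pyRange_one 1 (max_level + 1))]
    simp [PySem.Dict.empty]
  rw [hinit]
  have hb : max_level + 1 = 1 + ((max_level.toNat : Nat) : Int) := by omega
  rw [hb, dflLoop_range fpl max_level.toNat 1 rem [] hrem (by simp)]
  simp only [List.nil_append]
  refine List.map_congr_left fun l _ => ?_
  congr 1
  split_ifs with h1 h2 <;> omega

-- B's greedy loop over the last `left` levels: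
-- with remaining = q*left + r, 0 ≤ r < left (or r = 0), the first r levels get q+1, the rest q.
lemma gfold_spec : ∀ (left : Nat) (max_level q r : Int) (d : PySem.Dict Int Int),
    0 ≤ r → (r < (left : Int) ∨ r = 0) → (∀ k ∈ d.keys, k < max_level + 1 - left) →
    ((PySem.List.pyRange (max_level + 1 - left) (max_level + 1) 1).foldl
      (fun s level =>
        let share := -(PySem.Int.floordiv (-s.2) (max_level - level + 1))
        (s.1.insert level share, s.2 - share)) (d, q * left + r)).1.items
      = d.items ++ (PySem.List.pyRange (max_level + 1 - left) (max_level + 1) 1).map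
          (fun l => (l, q + if l - (max_level + 1 - left) < r then 1 else 0)) := by
  intro left
  induction left with
  | zero =>
      intro max_level q r d _ _ _
      rw [PySem.List.pyRange_one_eq_nil (by omega)]
      simp
  | succ m ih =>
      intro max_level q r d hr0 hr hd
      have hrlt : r < ((m : Int) + 1) := by
        rcases hr with h | h
        · push_cast at h; omega
        · omega
      set a := max_level + 1 - ((m + 1 : Nat) : Int) with ha
      have haval : a = max_level - m := by push_cast [ha]; ring
      rw [PySem.List.pyRange_one_cons (show a < max_level + 1 by omega)]
      rw [List.foldl_cons, List.map_cons]
      set s : Int := q + (if 0 < r then 1 else 0) with hs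
      have hshare : -(PySem.Int.floordiv (-(q * ((m + 1 : Nat) : Int) + r)) (max_level - a + 1)) = s := by
        rw [show max_level - a + 1 = (m : Int) + 1 by omega]
        rw [PySem.Int.neg_floordiv_neg_eq_iff_of_pos (by omega)]
        constructor
        · by_cases h : 0 < r <;> simp only [hs, if_pos, h] <;> push_cast <;> nlinarith
        · by_cases h : 0 < r <;> simp only [hs, if_pos, h] <;> push_cast <;> nlinarith
      simp only [hshare]
      have hnotc : d.contains a = false := by
        rw [PySem.Dict.contains_eq_decide_mem_keys]
        simp only [decide_eq_false_iff_not]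
        intro hmem
        have := hd a hmem
        omega
      have hrest : q * ((m + 1 : Nat) : Int) + r - s = q * (m : Nat) + (if 0 < r then r - 1 else 0) := by
        by_cases h : 0 < r <;> simp only [hs, if_pos, h] <;> push_cast <;> ring_nf <;> omega
      have hnext : a + 1 = max_level + 1 - ((m : Nat) : Int) := by omega
      rw [hrest, hnext]
      rw [ih max_level q (if 0 < r then r - 1 else 0) (d.insert a s) (by split_ifs <;> omega)
            (by split_ifs with h
                · left; push_cast; omega
                · right; rfl)
            (fun k hk => by
              rcases (PySem.Dict.mem_keys_insert _ _ _ _).mp hk with h | h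
              · omega
              · have := hd k h; omega)]
      rw [PySem.Dict.items_insert_of_not_contains _ _ hnotc]
      rw [List.append_assoc]
      congr 1
      rw [List.singleton_append]
      congr 1
      · simp only [hs]
        congr 1
        congr 1
        split_ifs with h1 h2 h2 <;> omega
      · rw [← hnext]
        refine List.map_congr_left fun l hl => ?_
        have hmem := PySem.List.mem_pyRange_one.mp hl
        congr 1
        split_ifs with h1 h2 h2 <;> omega

-- B equals the same closed form on positive max_level
lemma B_closed (total_files max_level : Int) (hpos : 0 < max_level) :
    distribute_files_across_levels_alt total_files max_level
      = (PySem.List.pyRange 1 (max_level + 1) 1).map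
          (fun l => (l, PySem.Int.floordiv total_files max_level
            + if l ≤ PySem.Int.mod total_files max_level then 1 else 0)) := by
  unfold distribute_files_across_levels_alt
  set q := PySem.Int.floordiv total_files max_level with hq
  set r := PySem.Int.mod total_files max_level with hr
  have hcast : ((max_level.toNat : Nat) : Int) = max_level := by omega
  have hdecomp : total_files = q * (max_level.toNat : Int) + r := by
    have := PySem.Int.floordiv_mul_add_mod total_files max_level
    rw [← hq, ← hr] at this
    rw [hcast]
    omega
  have hrlo : 0 ≤ r := by
    rw [hr, PySem.Int.mod_eq_emod_of_pos hpos]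
    exact Int.emod_nonneg _ (by omega)
  have hrhi : r < max_level := by
    rw [hr, PySem.Int.mod_eq_emod_of_pos hpos]
    exact Int.emod_lt_of_pos _ hpos
  have hstart : (1 : Int) = max_level + 1 - (max_level.toNat : Int) := by omega
  have hg := gfold_spec max_level.toNat max_level q r PySem.Dict.empty hrlo (Or.inl (by omega))
        (fun k hk => by simp [PySem.Dict.keys_empty] at hk)
  rw [← hstart, ← hdecomp] at hg
  rw [hg]
  simp only [PySem.Dict.empty, List.nil_append]
  refine List.map_congr_left fun l _ => ?_
  congr 1
  split_ifs with h1 h2 <;> omega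

-- ===== VERDICT (by name: the statements are the Claim_ definitions above) =====
theorem distribute_files_across_levels_spec : Claim_equal_distribute_files_across_levels := by
  intro total_files max_level _ hPre
  unfold Spec_distribute_files_across_levels
  rcases lt_or_gt_of_ne hPre with hneg | hpos
  · have hempty : PySem.List.pyRange 1 (max_level + 1) 1 = [] :=
      PySem.List.pyRange_one_eq_nil (by omega)
    unfold distribute_files_across_levels distribute_files_across_levels_alt
    simp [hempty, dflLoop, PySem.Dict.empty]
  · rw [A_closed total_files max_level hpos, B_closed total_files max_level hpos]
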